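-- pv_equiv track=rewrite | github.com/minataforest/programmers_coding_test | lv1/220113_42840_test.py | solution
-- ===== SOURCE A (Python) =====
-- def solution(answers):
--     fst = [1, 2, 3, 4, 5]
--     scd = [2, 1, 2, 3, 2, 4, 2, 5]
--     thd = [3, 3, 1, 1, 2, 2, 4, 4, 5, 5]
--
--     if len(fst) < len(answers):
--         fst *= (len(answers) // len(fst)) + 1
--
--     if len(scd) < len(answers):
--         scd *= (len(answers) // len(scd)) + 1
--
--     if len(thd) < len(answers):
--         thd *= (len(answers) // len(thd)) + 1
--
--     a = {1: 0, 2: 0, 3: 0}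
--
--     for i in range(0, len(answers)):
--         a[1] += 1 if answers[i] == fst[i] else 0
--         a[2] += 1 if answers[i] == scd[i] else 0
--         a[3] += 1 if answers[i] == thd[i] else 0
--
--     answer = []
--     answer_max = max(a.values())
--
--     for key, value in a.items():
--         if value == answer_max:
--             answer.append(key)
--
--     return answer
-- ===== SOURCE B (Python) =====
-- def solution(answers):
--     # Histogram pass: count pairs (position mod 40, answer); 40 = lcm of the three
--     # pattern lengths, so each pattern's score is a 40-term table lookup afterwards.
--     cnt = {}
--     for i, x in enumerate(answers):
--         key = (i % 40, x)
--         cnt[key] = cnt.get(key, 0) + 1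
--     patterns = ([1, 2, 3, 4, 5], [2, 1, 2, 3, 2, 4, 2, 5], [3, 3, 1, 1, 2, 2, 4, 4, 5, 5])
--     scores = [sum(cnt.get((j, p[j % len(p)]), 0) for j in range(40)) for p in patterns]
--     m = max(scores)
--     return [k for k, s in zip((1, 2, 3), scores) if s == m]
-- ===== Notes on version B (the rewrite author's own statement) =====
-- stated objective: alternative
-- what changed: B replaces A's pre-multiplied (tiled) pattern lists and per-element triple comparison loop by a single histogram pass that counts pairs (index mod 40, answer) in a dict (40 = lcm of the pattern lengths), after which each pattern's score is a 40-term table lookup sum independent of the comparisons, followed by max and a zip-based selection.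
import Mathlib
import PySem

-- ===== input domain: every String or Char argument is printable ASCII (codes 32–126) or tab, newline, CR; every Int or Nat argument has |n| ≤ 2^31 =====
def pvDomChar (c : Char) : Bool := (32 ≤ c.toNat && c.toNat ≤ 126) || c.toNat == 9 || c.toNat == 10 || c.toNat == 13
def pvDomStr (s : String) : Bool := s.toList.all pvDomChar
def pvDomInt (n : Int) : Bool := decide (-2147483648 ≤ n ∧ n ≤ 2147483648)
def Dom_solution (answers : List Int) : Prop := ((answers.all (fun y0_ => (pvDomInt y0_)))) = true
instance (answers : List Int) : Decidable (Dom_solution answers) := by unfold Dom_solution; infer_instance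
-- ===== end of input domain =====

-- B re-implements the mock-exam scorer with one histogram pass over (index mod 40, answer)
-- pairs and 40-term table lookups per pattern instead of A's tiled pattern lists and
-- per-element triple comparison loop; objective: alternative, same O(n) cost.

-- ===== PORT A =====
-- A's dict a = {1:0, 2:0, 3:0} has three fixed literal keys; it is ported as the
-- triple (a[1], a[2], a[3]); a.items() iterates in insertion order 1, 2, 3, which
-- the final concatenation of the three if-branches follows.
def solution (answers : List Int) : List Int :=
  let fst0 : List Int := [1, 2, 3, 4, 5]
  let scd0 : List Int := [2, 1, 2, 3, 2, 4, 2, 5]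
  let thd0 : List Int := [3, 3, 1, 1, 2, 2, 4, 4, 5, 5]
  let n := answers.length
  -- 'lst *= k' is pyRepeat lst k; len//len is Nat division of two Nat lengths (both ≥ 0, Python-exact)
  let fstL := if fst0.length < n then PySem.List.pyRepeat fst0 ((n / fst0.length + 1 : Nat) : Int) else fst0
  let scdL := if scd0.length < n then PySem.List.pyRepeat scd0 ((n / scd0.length + 1 : Nat) : Int) else scd0
  let thdL := if thd0.length < n then PySem.List.pyRepeat thd0 ((n / thd0.length + 1 : Nat) : Int) else thd0
  -- indexing answers[i] / fst[i] is in range for every i in range(len(answers)), so pyGetD is exact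
  let a := (PySem.List.pyRange 0 (n : Int) 1).foldl
    (fun (a : Int × Int × Int) i =>
      (a.1 + (if PySem.List.pyGetD answers i 0 == PySem.List.pyGetD fstL i 0 then 1 else 0),
       a.2.1 + (if PySem.List.pyGetD answers i 0 == PySem.List.pyGetD scdL i 0 then 1 else 0),
       a.2.2 + (if PySem.List.pyGetD answers i 0 == PySem.List.pyGetD thdL i 0 then 1 else 0)))
    (0, 0, 0)
  let answerMax := max (max a.1 a.2.1) a.2.2   -- max(a.values()) over the three Int values
  (if a.1 == answerMax then [1] else []) ++
    (if a.2.1 == answerMax then [2] else []) ++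
      (if a.2.2 == answerMax then [3] else [])

-- ===== PORT B =====
-- Source B's histogram loop 'for i, x in enumerate(answers): cnt[key] = cnt.get(key, 0) + 1'
def histo (answers : List Int) : PySem.Dict (Int × Int) Int :=
  -- python's temporary 'key = (i % 40, x)' is inlined at its two uses
  (PySem.List.enumerate answers).foldl
    (fun d e =>
      d.insert (PySem.Int.mod e.1 40, e.2)
        (d.getD (PySem.Int.mod e.1 40, e.2) 0 + 1))
    PySem.Dict.empty

-- Source B's 'sum(cnt.get((j, p[j % len(p)]), 0) for j in range(40))'
def scoreB (cnt : PySem.Dict (Int × Int) Int) (p : List Int) : Int :=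
  ((PySem.List.pyRange 0 40 1).map
    (fun j => cnt.getD (j, PySem.List.pyGetD p (PySem.Int.mod j (p.length : Int)) 0) 0)).sum

def solution_alt (answers : List Int) : List Int :=
  let cnt := histo answers
  let patterns : List (List Int) :=
    [[1, 2, 3, 4, 5], [2, 1, 2, 3, 2, 4, 2, 5], [3, 3, 1, 1, 2, 2, 4, 4, 5, 5]]
  let scores := patterns.map (scoreB cnt)
  -- max(scores): scores is a nonempty literal list, so max? is some; getD 0 is never taken
  let m := (PySem.List.max? scores (fun x => x)).getD 0
  ((List.zip [1, 2, 3] scores).filter (fun ks => ks.2 == m)).map (·.1)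

-- ===== PRECONDITION & SPEC =====
def Spec_solution (answers : List Int) (out : List Int) : Prop := out = solution_alt answers
instance (answers : List Int) (out : List Int) : Decidable (Spec_solution answers out) := by unfold Spec_solution; infer_instance

-- ===== CLAIM (what is proved, stated in full; the proofs are below) =====
def Claim_equal_solution : Prop := ∀ (answers : List Int), Dom_solution answers → Spec_solution answers (solution answers)

-- ===== LEMMAS AND PROOFS =====

-- the common middle form of a pattern score: per-index comparison with modular indexing
def midScore (answers p : List Int) : Int :=
  ((PySem.List.pyRange 0 (answers.length : Int) 1).map
    (fun i => if PySem.List.pyGetD answers i 0 ==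
        PySem.List.pyGetD p (PySem.Int.mod i (p.length : Int)) 0 then (1 : Int) else 0)).sum

-- a triple-accumulator fold of three independent +increments splits into three sums
theorem foldl_prod3 {α : Type} (l : List α) (f g h : α → Int) (c1 c2 c3 : Int) :
    l.foldl (fun (a : Int × Int × Int) x => (a.1 + f x, a.2.1 + g x, a.2.2 + h x)) (c1, c2, c3)
      = (c1 + (l.map f).sum, c2 + (l.map g).sum, c3 + (l.map h).sum) := by
  induction l generalizing c1 c2 c3 with
  | nil => simp
  | cons y ys ih => simp [List.foldl_cons, ih]; and_intros <;> ring

-- getD on a pyRepeat-extended list is getD on the base list at the index mod its length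
theorem pyRepeat_natCast_succ (p : List Int) (k : Nat) :
    PySem.List.pyRepeat p ((k + 1 : Nat) : Int) = p ++ PySem.List.pyRepeat p (k : Int) := by
  simp [PySem.List.pyRepeat, List.replicate_succ]

theorem getD_pyRepeat_mod (p : List Int) (k i : Nat) (hp : p ≠ [])
    (hi : i < k * p.length) :
    (PySem.List.pyRepeat p (k : Int)).getD i 0 = p.getD (i % p.length) 0 := by
  induction k generalizing i with
  | zero => omega
  | succ k ih =>
    rw [pyRepeat_natCast_succ]
    have hL : 0 < p.length := List.length_pos_iff.mpr hp
    by_cases hcase : i < p.length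
    · rw [List.getD_append _ _ _ _ hcase, Nat.mod_eq_of_lt hcase]
    · push Not at hcase
      rw [List.getD_append_right _ _ _ _ hcase, Nat.mod_eq_sub_mod hcase]
      have hsm : (k + 1) * p.length = k * p.length + p.length := Nat.succ_mul _ _
      exact ih (i - p.length) (by omega)

-- the extended list A indexes agrees with modular indexing on every i < answers.length
theorem ext_getD (p : List Int) (hp : p ≠ []) (n i : Nat) (hi : i < n) :
    (if p.length < n then PySem.List.pyRepeat p ((n / p.length + 1 : Nat) : Int) else p).getD i 0
      = p.getD (i % p.length) 0 := by
  have hL : 0 < p.length := List.length_pos_iff.mpr hp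
  by_cases hlt : p.length < n
  · rw [if_pos hlt]
    refine getD_pyRepeat_mod p _ i hp ?_
    have h1 := Nat.div_add_mod n p.length
    have h2 : n % p.length < p.length := Nat.mod_lt _ hL
    have h3 : (n / p.length + 1) * p.length = p.length * (n / p.length) + p.length := by
      rw [Nat.succ_mul, Nat.mul_comm]
    omega
  · rw [if_neg hlt, Nat.mod_eq_of_lt (by omega)]

-- A side: the 0/1-sum over range(len) against the extended pattern is midScore
theorem scoreA_eq (answers p : List Int) (hp : p ≠ []) :
    ((PySem.List.pyRange 0 (answers.length : Int) 1).map
        (fun i => if PySem.List.pyGetD answers i 0 ==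
            PySem.List.pyGetD
              (if p.length < answers.length then
                PySem.List.pyRepeat p ((answers.length / p.length + 1 : Nat) : Int) else p) i 0
          then (1 : Int) else 0)).sum
      = midScore answers p := by
  unfold midScore
  congr 1
  refine List.map_congr_left (fun j hj => ?_)
  rw [PySem.List.mem_pyRange_one] at hj
  obtain ⟨k, rfl⟩ : ∃ k : Nat, j = (k : Int) := ⟨j.toNat, (Int.toNat_of_nonneg hj.1).symm⟩
  have hk : k < answers.length := by exact_mod_cast hj.2
  simp only [PySem.Int.mod_natCast, PySem.List.pyGetD_natCast]
  rw [ext_getD p hp answers.length k hk]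

-- if m is absent from js, the indicator sum over js vanishes
theorem sum_ind_not_mem (js : List Int) (g : Int → Int) (m b : Int) (hm : m ∉ js) :
    (js.map (fun j => if (m, b) == (j, g j) then (1 : Int) else 0)).sum = 0 := by
  induction js with
  | nil => simp
  | cons j js' ih =>
    have hjm : m ≠ j := fun h => hm (h ▸ List.mem_cons_self)
    have hm' : m ∉ js' := fun h => hm (List.mem_cons_of_mem _ h)
    simp only [List.map_cons, List.sum_cons, ih hm']
    have : ((m, b) == (j, g j)) = false := by simp [Prod.ext_iff, hjm]
    simp [this]

-- the indicator sum over a nodup list containing m collapses to the term at j = m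
theorem sum_ind (js : List Int) (g : Int → Int) (m b : Int)
    (hnd : js.Nodup) (hm : m ∈ js) :
    (js.map (fun j => if (m, b) == (j, g j) then (1 : Int) else 0)).sum
      = if b == g m then 1 else 0 := by
  induction js with
  | nil => simp at hm
  | cons j js' ih =>
    simp only [List.map_cons, List.sum_cons]
    by_cases hj : j = m
    · subst hj
      have hnotin : j ∉ js' := (List.nodup_cons.mp hnd).1
      rw [sum_ind_not_mem js' g j b hnotin]
      simp [Prod.ext_iff]
    · have hm' : m ∈ js' := by
        rcases List.mem_cons.mp hm with h | h
        · exact absurd h.symm hj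
        · exact h
      have : ((m, b) == (j, g j)) = false := by
        simp [Prod.ext_iff]; intro h; exact absurd h.symm hj
      rw [ih (List.nodup_cons.mp hnd).2 hm']
      simp [this]

theorem pyRange40_nodup : (PySem.List.pyRange 0 40 1).Nodup := by decide

theorem mem_pyRange40_mod (a : Int) : PySem.Int.mod a 40 ∈ PySem.List.pyRange 0 40 1 := by
  have hpos : (0 : Int) < 40 := by omega
  rw [PySem.List.mem_pyRange_one, PySem.Int.mod_eq_emod_of_pos hpos]
  exact ⟨Int.emod_nonneg a (by omega), Int.emod_lt_of_pos a hpos⟩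

-- the 40-bucket histogram sum over counts of (j, g j) is the per-element indicator sum
theorem count_sum (l : List (Int × Int)) (g : Int → Int) :
    ((PySem.List.pyRange 0 40 1).map
        (fun j => ((l.map (fun e => (PySem.Int.mod e.1 40, e.2))).count (j, g j) : Int))).sum
      = (l.map (fun e => if e.2 == g (PySem.Int.mod e.1 40) then (1 : Int) else 0)).sum := by
  induction l with
  | nil => simp
  | cons e tl ih =>
    simp only [List.map_cons, List.sum_cons, List.count_cons]
    have hsplit :
        ((PySem.List.pyRange 0 40 1).map
            (fun j => (((tl.map (fun e => (PySem.Int.mod e.1 40, e.2))).count (j, g j)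
              + if ((PySem.Int.mod e.1 40, e.2) == (j, g j)) then 1 else 0 : Nat) : Int))).sum
          = ((PySem.List.pyRange 0 40 1).map
              (fun j => ((tl.map (fun e => (PySem.Int.mod e.1 40, e.2))).count (j, g j) : Int))).sum
            + ((PySem.List.pyRange 0 40 1).map
              (fun j => if ((PySem.Int.mod e.1 40, e.2) == (j, g j)) then (1 : Int) else 0)).sum := by
      induction PySem.List.pyRange 0 40 1 with
      | nil => simp
      | cons j js ihh =>
        simp only [List.map_cons, List.sum_cons, ihh]
        push_cast
        split <;> ring
    rw [hsplit, ih,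
      sum_ind (PySem.List.pyRange 0 40 1) g (PySem.Int.mod e.1 40) e.2
        pyRange40_nodup (mem_pyRange40_mod e.1)]
    ring

-- keyed counting-fold: insert with key f x accumulates the count of v among the mapped keys
theorem getD_foldl_insert_key {α : Type} (f : α → Int × Int) (l : List α)
    (d : PySem.Dict (Int × Int) Int) (v : Int × Int) :
    (l.foldl (fun d x => d.insert (f x) (d.getD (f x) 0 + 1)) d).getD v 0
      = d.getD v 0 + ((l.map f).count v : Int) := by
  induction l generalizing d with
  | nil => simp
  | cons x xs ih =>
    simp only [List.foldl_cons, List.map_cons, List.count_cons, ih]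
    rw [PySem.Dict.getD_insert]
    by_cases hv : v = f x
    · simp only [hv, beq_self_eq_true, if_pos]
      push_cast
      ring
    · have hfx : (f x == v) = false := by
        simp only [beq_eq_false_iff_ne]
        exact fun h => hv h.symm
      simp [hv, hfx]

-- B side: the table-lookup score over the histogram is midScore
theorem scoreB_eq (answers p : List Int) (hp : p ≠ []) (hdvd : p.length ∣ 40) :
    scoreB (histo answers) p = midScore answers p := by
  unfold scoreB midScore
  -- the histogram lookup is the key-count of the mapped key list
  have hgetD : ∀ v : Int × Int,
      (histo answers).getD v 0
        = (((PySem.List.enumerate answers).map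
            (fun e => (PySem.Int.mod e.1 40, e.2))).count v : Int) := by
    intro v
    unfold histo
    rw [getD_foldl_insert_key (fun e : Int × Int => (PySem.Int.mod e.1 40, e.2))
      (PySem.List.enumerate answers) PySem.Dict.empty v]
    simp [PySem.Dict.empty, PySem.Dict.getD, PySem.Dict.get?]
  simp only [hgetD]
  rw [count_sum (PySem.List.enumerate answers)
    (fun j => PySem.List.pyGetD p (PySem.Int.mod j (p.length : Int)) 0)]
  rw [PySem.List.enumerate_eq_map_pyRange answers 0, List.map_map]
  congr 1
  refine List.map_congr_left (fun j hj => ?_)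
  rw [PySem.List.mem_pyRange_one] at hj
  obtain ⟨k, rfl⟩ : ∃ k : Nat, j = (k : Int) := ⟨j.toNat, (Int.toNat_of_nonneg hj.1).symm⟩
  have hL : 0 < p.length := List.length_pos_iff.mpr hp
  have h40 : (40 : Int) = ((40 : Nat) : Int) := by norm_num
  simp only [Function.comp, h40, PySem.Int.mod_natCast, PySem.List.pyGetD_natCast]
  rw [Nat.mod_mod_of_dvd k hdvd]

-- the if-concatenation selection equals the zip/filter/map selection
theorem select3 (M s1 s2 s3 : Int) :
    (if s1 == M then [(1 : Int)] else []) ++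
        (if s2 == M then [2] else []) ++ (if s3 == M then [3] else [])
      = ((List.zip [(1 : Int), 2, 3] [s1, s2, s3]).filter (fun ks => ks.2 == M)).map (·.1) := by
  have hz : List.zip [(1 : Int), 2, 3] [s1, s2, s3] = [(1, s1), (2, s2), (3, s3)] := rfl
  rw [hz]
  simp only [List.filter_cons, List.filter_nil]
  split_ifs <;> rfl

-- max([s1,s2,s3]) is the nested binary max
theorem max3_eq (s1 s2 s3 : Int) :
    (PySem.List.max? [s1, s2, s3] (fun x => x)).getD 0 = max (max s1 s2) s3 := by
  rw [show ([s1, s2, s3] : List Int) = s1 :: [s2, s3] from rfl, PySem.List.max?_id_cons]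
  simp [List.foldl]

-- ===== VERDICT (by name: the statement is the Claim_ definition above) =====
theorem solution_spec : Claim_equal_solution := by
  intro answers _
  unfold Spec_solution solution solution_alt
  dsimp only
  rw [foldl_prod3]
  simp only [List.map_cons, List.map_nil]
  rw [scoreA_eq answers [1, 2, 3, 4, 5] (by simp),
    scoreA_eq answers [2, 1, 2, 3, 2, 4, 2, 5] (by simp),
    scoreA_eq answers [3, 3, 1, 1, 2, 2, 4, 4, 5, 5] (by simp)]
  rw [scoreB_eq answers [1, 2, 3, 4, 5] (by simp) (by decide),
    scoreB_eq answers [2, 1, 2, 3, 2, 4, 2, 5] (by simp) (by decide),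
    scoreB_eq answers [3, 3, 1, 1, 2, 2, 4, 4, 5, 5] (by simp) (by decide)]
  simp only [zero_add]
  generalize midScore answers [1, 2, 3, 4, 5] = s1
  generalize midScore answers [2, 1, 2, 3, 2, 4, 2, 5] = s2
  generalize midScore answers [3, 3, 1, 1, 2, 2, 4, 4, 5, 5] = s3
  rw [max3_eq]
  exact select3 (max (max s1 s2) s3) s1 s2 s3
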